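-- pv_equiv track=rewrite | github.com/dariavasile/DataInTheWildProject | Data Processing/edit_asos.py | extract_min_max_sizes
-- ===== SOURCE A (Python) =====
-- def extract_min_max_sizes(sizes):
--     sizes_str = str(sizes)
--     size_list = [size.strip() for size in sizes_str.split(',')]
--
--
--     sizes_order = ['XXS','XS', 'S', 'M', 'L', 'XL', '2XL','3XL','4XL','5XL', '6XL', '7XL']
--     min_size = max_size = None
--
--     for size in size_list:
--         if size in sizes_order:
--             if min_size is None or sizes_order.index(size) < sizes_order.index(min_size):
--                 min_size = size
--             if max_size is None or sizes_order.index(size) > sizes_order.index(max_size):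
--                 max_size = size
--
--     return min_size, max_size
-- ===== SOURCE B (Python) =====
-- SIZES_ORDER = ['XXS', 'XS', 'S', 'M', 'L', 'XL', '2XL', '3XL', '4XL', '5XL', '6XL', '7XL']
--
--
-- def extract_min_max_sizes(sizes):
--     tokens = {t.strip() for t in str(sizes).split(',')}
--     present = [s for s in SIZES_ORDER if s in tokens]
--     if not present:
--         return None, None
--     return present[0], present[-1]
-- ===== Notes on version B (the rewrite author's own statement) =====
-- stated objective: alternative
-- what changed: Instead of scanning the tokens while tracking min/max via repeated list.index lookups, B builds a set of stripped tokens once and scans the fixed size ordering, returning the first and the last size present in that set.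
import Mathlib
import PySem

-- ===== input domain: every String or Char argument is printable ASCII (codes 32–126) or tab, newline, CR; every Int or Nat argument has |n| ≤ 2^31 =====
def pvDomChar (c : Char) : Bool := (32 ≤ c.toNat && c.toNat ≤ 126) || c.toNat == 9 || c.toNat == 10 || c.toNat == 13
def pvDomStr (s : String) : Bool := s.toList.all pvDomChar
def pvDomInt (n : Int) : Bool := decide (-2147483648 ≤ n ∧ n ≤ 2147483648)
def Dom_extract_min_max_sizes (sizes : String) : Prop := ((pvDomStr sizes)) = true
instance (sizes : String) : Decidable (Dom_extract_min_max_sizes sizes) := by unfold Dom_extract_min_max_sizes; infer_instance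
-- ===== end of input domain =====

-- B replaces A's single pass over the tokens (tracking optional min/max with repeated
-- list.index lookups) by building the set of stripped tokens once and scanning the fixed
-- size ordering, returning the first and the last size present (alternative algorithm).

-- ===== PORT A =====
-- sizes_order (shared constant of the module)
def pvOrder : List String := ["XXS", "XS", "S", "M", "L", "XL", "2XL", "3XL", "4XL", "5XL", "6XL", "7XL"]

-- sizes_order.index(s): total form of list.index; only used under the membership guard
def pvIdx (s : String) : Nat := (PySem.List.index? pvOrder s).getD 0

-- body of A's 'if size in sizes_order:' branch (state = (min_size, max_size))
def pvInner (st : Option String × Option String) (size : String) : Option String × Option String :=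
  (match st.1 with
   | none => some size
   | some m => if pvIdx size < pvIdx m then some size else some m,
   match st.2 with
   | none => some size
   | some m => if pvIdx m < pvIdx size then some size else some m)

-- one iteration of A's for-loop
def pvStepA (st : Option String × Option String) (size : String) : Option String × Option String :=
  if pvOrder.contains size then pvInner st size else st

-- str(sizes) is the identity here since sizes is already a str
def extract_min_max_sizes (sizes : String) : Option String × Option String :=
  ((((PySem.Str.split? sizes ",").getD []).map PySem.Str.strip).foldl pvStepA (none, none))

-- ===== PORT B =====
def extract_min_max_sizes_alt (sizes : String) : Option String × Option String :=
  let tokens : PySem.Set String :=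
    PySem.Set.ofList (((PySem.Str.split? sizes ",").getD []).map PySem.Str.strip)
  match pvOrder.filter (fun s => PySem.Set.contains tokens s) with
  | [] => (none, none)
  | h :: t => (some h, some ((h :: t).getLast (List.cons_ne_nil h t)))

-- ===== PRECONDITION & SPEC =====
def Spec_extract_min_max_sizes (sizes : String) (out : Option String × Option String) : Prop := out = extract_min_max_sizes_alt sizes
instance (sizes : String) (out : Option String × Option String) : Decidable (Spec_extract_min_max_sizes sizes out) := by unfold Spec_extract_min_max_sizes; infer_instance

-- ===== CLAIM (what is proved, stated in full; the proofs are below) =====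
def Claim_equal_extract_min_max_sizes : Prop := ∀ (sizes : String), Dom_extract_min_max_sizes sizes → Spec_extract_min_max_sizes sizes (extract_min_max_sizes sizes)

-- ===== LEMMAS AND PROOFS =====

-- pvNth k = SIZES_ORDER[k] (used only in the proofs, not by the ports)
def pvNth (k : Nat) : String := PySem.List.pyGetD pvOrder (k : Int) ""

-- every member of pvOrder is recovered by pvNth ∘ pvIdx, with pvIdx < 12
theorem pv_contains_spec (s : String) (h : pvOrder.contains s = true) :
    pvIdx s < 12 ∧ pvNth (pvIdx s) = s := by
  have hmem : s ∈ pvOrder := by simpa using h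
  simp only [pvOrder, List.mem_cons, List.not_mem_nil, or_false] at hmem
  rcases hmem with rfl | rfl | rfl | rfl | rfl | rfl | rfl | rfl | rfl | rfl | rfl | rfl <;> exact ⟨by decide, by decide⟩

theorem pv_idx_nth (k : Nat) (hk : k < 12) : pvIdx (pvNth k) = k := by
  revert hk; revert k; decide

theorem pv_contains_nth (k : Nat) (hk : k < 12) : pvOrder.contains (pvNth k) = true := by
  revert hk; revert k; decide

theorem pv_order_eq_map : pvOrder = (List.range 12).map pvNth := by decide

-- foldl min / max compute the minimum / maximum of the nonempty list h :: t
theorem pv_foldl_min_mem (t : List Nat) (h : Nat) : t.foldl min h ∈ h :: t := by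
  induction t generalizing h with
  | nil => simp
  | cons a t ih =>
    have hm := ih (min h a)
    rcases min_choice h a with hc | hc <;> rw [hc] at hm <;>
      simp only [List.foldl_cons, hc, List.mem_cons] at hm ⊢ <;> tauto

theorem pv_foldl_min_le (t : List Nat) : ∀ (h x : Nat), x ∈ h :: t → t.foldl min h ≤ x := by
  induction t with
  | nil => intro h x hx; simp at hx; simp [hx]
  | cons a t ih =>
    intro h x hx
    simp only [List.foldl_cons]
    have hmem : t.foldl min (min h a) ≤ min h a := ih (min h a) (min h a) (List.mem_cons_self ..)
    rcases List.mem_cons.mp hx with rfl | hx'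
    · exact le_trans hmem (min_le_left ..)
    · rcases List.mem_cons.mp hx' with rfl | hx''
      · exact le_trans hmem (min_le_right ..)
      · exact ih (min h a) x (List.mem_cons_of_mem _ hx'')

theorem pv_foldl_max_mem (t : List Nat) (h : Nat) : t.foldl max h ∈ h :: t := by
  induction t generalizing h with
  | nil => simp
  | cons a t ih =>
    have hm := ih (max h a)
    rcases max_choice h a with hc | hc <;> rw [hc] at hm <;>
      simp only [List.foldl_cons, hc, List.mem_cons] at hm ⊢ <;> tauto

theorem pv_le_foldl_max (t : List Nat) : ∀ (h x : Nat), x ∈ h :: t → x ≤ t.foldl max h := by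
  induction t with
  | nil => intro h x hx; simp at hx; simp [hx]
  | cons a t ih =>
    intro h x hx
    simp only [List.foldl_cons]
    have hmem : max h a ≤ t.foldl max (max h a) := ih (max h a) (max h a) (List.mem_cons_self ..)
    rcases List.mem_cons.mp hx with rfl | hx'
    · exact le_trans (le_max_left ..) hmem
    · rcases List.mem_cons.mp hx' with rfl | hx''
      · exact le_trans (le_max_right ..) hmem
      · exact ih (max h a) x (List.mem_cons_of_mem _ hx'')

-- on a strictly sorted list, the first element passing p is the minimal one
theorem pv_head_filter (p : Nat → Bool) (l : List Nat) (hl : l.Pairwise (· < ·)) (M : Nat)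
    (hM : M ∈ l) (hp : p M = true) (hmin : ∀ k ∈ l, p k = true → M ≤ k) :
    (l.filter p).head? = some M := by
  induction l with
  | nil => cases hM
  | cons a t ih =>
    by_cases ha : p a = true
    · rcases List.mem_cons.mp hM with rfl | hMt
      · simp [ha]
      · have h1 : a < M := (List.pairwise_cons.mp hl).1 M hMt
        have h2 : M ≤ a := hmin a (List.mem_cons_self ..) ha
        omega
    · have hMt : M ∈ t := by
        rcases List.mem_cons.mp hM with rfl | h
        · exact absurd hp ha
        · exact h
      simp only [List.filter_cons, ha, Bool.false_eq_true, if_false]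
      exact ih (List.pairwise_cons.mp hl).2 hMt (fun k hk => hmin k (List.mem_cons_of_mem _ hk))

-- on a strictly sorted list, the last element passing p is the maximal one
theorem pv_getLast_filter (p : Nat → Bool) (l : List Nat) (hl : l.Pairwise (· < ·)) (N : Nat)
    (hN : N ∈ l) (hp : p N = true) (hmax : ∀ k ∈ l, p k = true → k ≤ N) :
    (l.filter p).getLast? = some N := by
  induction l with
  | nil => cases hN
  | cons a t ih =>
    by_cases hNt : N ∈ t
    · have hrec := ih (List.pairwise_cons.mp hl).2 hNt (fun k hk => hmax k (List.mem_cons_of_mem _ hk))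
      have hne : t.filter p ≠ [] := by
        intro he; rw [he] at hrec; cases hrec
      rw [List.filter_cons]
      split
      · rw [show a :: t.filter p = [a] ++ t.filter p from rfl, List.getLast?_append_of_ne_nil [a] hne]
        exact hrec
      · exact hrec
    · have hNa : N = a := by
        rcases List.mem_cons.mp hN with rfl | h
        · rfl
        · exact absurd h hNt
      subst hNa
      have hft : t.filter p = [] := by
        rw [List.filter_eq_nil_iff]
        intro k hk hpk
        have h1 : N < k := (List.pairwise_cons.mp hl).1 k hk
        have h2 : k ≤ N := hmax k (List.mem_cons_of_mem _ hk) hpk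
        omega
      simp [hp, hft]

-- A's loop result, characterised as min/max over the valid indices (from the earlier A-side analysis)
theorem pv_loopA (l : List String) (h : ∀ t ∈ l, pvOrder.contains t = true)
    (i j : Nat) (hi : i < 12) (hj : j < 12) :
    l.foldl pvInner (some (pvNth i), some (pvNth j)) =
      (some (pvNth ((l.map pvIdx).foldl min i)), some (pvNth ((l.map pvIdx).foldl max j))) := by
  induction l generalizing i j with
  | nil => simp
  | cons t rest ih =>
    have ht : pvOrder.contains t = true := h t (List.mem_cons_self ..)
    obtain ⟨htlt, -⟩ := pv_contains_spec t ht
    have h1 : (if pvIdx t < i then some t else some (pvNth i)) = some (pvNth (min i (pvIdx t))) := by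
      rcases Nat.lt_or_ge (pvIdx t) i with hlt | hge
      · rw [if_pos hlt, Nat.min_eq_right (Nat.le_of_lt hlt)]
        exact congrArg some ((pv_contains_spec t ht).2.symm)
      · rw [if_neg (Nat.not_lt.mpr hge), Nat.min_eq_left hge]
    have h2 : (if j < pvIdx t then some t else some (pvNth j)) = some (pvNth (max j (pvIdx t))) := by
      rcases Nat.lt_or_ge j (pvIdx t) with hlt | hge
      · rw [if_pos hlt, Nat.max_eq_right (Nat.le_of_lt hlt)]
        exact congrArg some ((pv_contains_spec t ht).2.symm)
      · rw [if_neg (Nat.not_lt.mpr hge), Nat.max_eq_left hge]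
    have hstep : pvInner (some (pvNth i), some (pvNth j)) t =
        (some (pvNth (min i (pvIdx t))), some (pvNth (max j (pvIdx t)))) := by
      simp only [pvInner, pv_idx_nth i hi, pv_idx_nth j hj, h1, h2]
    simp only [List.foldl_cons, List.map_cons, hstep]
    exact ih (fun x hx => h x (List.mem_cons_of_mem _ hx))
      (min i (pvIdx t)) (max j (pvIdx t))
      (lt_of_le_of_lt (Nat.min_le_left ..) hi) (Nat.max_lt.mpr ⟨hj, htlt⟩)

theorem pv_main (l : List String) (hall : ∀ t ∈ l, pvOrder.contains t = true) :
    l.foldl pvInner (none, none) =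
      (match l.map pvIdx with
       | [] => ((none : Option String), (none : Option String))
       | h :: t => (some (pvNth (t.foldl min h)), some (pvNth (t.foldl max h)))) := by
  match l, hall with
  | [], _ => rfl
  | t :: rest, hall =>
    have ht : pvOrder.contains t = true := hall t (List.mem_cons_self ..)
    obtain ⟨htlt, hnth⟩ := pv_contains_spec t ht
    have hfirst : pvInner (none, none) t = (some (pvNth (pvIdx t)), some (pvNth (pvIdx t))) := by
      simp [pvInner, hnth]
    simp only [List.foldl_cons, hfirst, List.map_cons]
    rw [pv_loopA rest (fun x hx => hall x (List.mem_cons_of_mem _ hx)) (pvIdx t) (pvIdx t) htlt htlt]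

-- B's guarded match equals (head?, getLast?)
theorem pv_match_eq (xs : List String) :
    (match xs with
     | [] => ((none : Option String), (none : Option String))
     | h :: t => (some h, some ((h :: t).getLast (List.cons_ne_nil h t))))
    = (xs.head?, xs.getLast?) := by
  cases xs with
  | nil => rfl
  | cons h t => simp [List.getLast?_eq_some_getLast]

-- the bridge: min/max over valid indices of l  =  first/last of pvOrder present in set(l)
theorem pv_bridge (l : List String) :
    (match (l.filter (fun t => pvOrder.contains t)).map pvIdx with
     | [] => ((none : Option String), (none : Option String))
     | h :: t => (some (pvNth (t.foldl min h)), some (pvNth (t.foldl max h))))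
    = (match pvOrder.filter (fun s => PySem.Set.contains (PySem.Set.ofList l) s) with
       | [] => (none, none)
       | h :: t => (some h, some ((h :: t).getLast (List.cons_ne_nil h t)))) := by
  classical
  set p : Nat → Bool := fun k => PySem.Set.contains (PySem.Set.ofList l) (pvNth k) with hp
  have hfilter : pvOrder.filter (fun s => PySem.Set.contains (PySem.Set.ofList l) s)
      = ((List.range 12).filter p).map pvNth := by
    rw [pv_order_eq_map, List.filter_map]; rfl
  set idxs := (l.filter (fun t => pvOrder.contains t)).map pvIdx with hidxs
  have hmemidx : ∀ k, k < 12 → (k ∈ idxs ↔ p k = true) := by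
    intro k hk
    constructor
    · intro hkin
      obtain ⟨t, htmem, rfl⟩ := List.mem_map.mp hkin
      have ht : pvOrder.contains t = true := by
        simpa using (List.mem_filter.mp htmem).2
      have htl : t ∈ l := List.mem_of_mem_filter htmem
      have hnth := (pv_contains_spec t ht).2
      show (PySem.Set.ofList l).contains (pvNth (pvIdx t)) = true
      rw [hnth]
      exact List.contains_iff_mem.mpr ((PySem.Set.mem_ofList _ _).mpr htl)
    · intro hpk
      have hml : pvNth k ∈ l := by
        have hsm : pvNth k ∈ PySem.Set.ofList l := List.contains_iff_mem.mp hpk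
        exact (PySem.Set.mem_ofList _ _).mp hsm
      have hc : pvOrder.contains (pvNth k) = true := pv_contains_nth k hk
      have : pvNth k ∈ l.filter (fun t => pvOrder.contains t) := by
        apply List.mem_filter.mpr
        exact ⟨hml, by simpa using hc⟩
      have := List.mem_map_of_mem (f := pvIdx) this
      rwa [pv_idx_nth k hk] at this
  have hlt : ∀ k ∈ idxs, k < 12 := by
    intro k hkin
    obtain ⟨t, htmem, rfl⟩ := List.mem_map.mp hkin
    have ht : pvOrder.contains t = true := by
      simpa using (List.mem_filter.mp htmem).2
    exact (pv_contains_spec t ht).1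
  rw [hfilter]
  cases hcase : idxs with
  | nil =>
    have hempty : (List.range 12).filter p = [] := by
      rw [List.filter_eq_nil_iff]
      intro k hk hpk
      have hk12 : k < 12 := List.mem_range.mp hk
      have : k ∈ idxs := (hmemidx k hk12).mpr hpk
      rw [hcase] at this; cases this
    rw [hempty]; rfl
  | cons h t =>
    have hsub : ∀ x, x ∈ h :: t → x ∈ idxs := by intro x hx; rw [hcase]; exact hx
    set M := t.foldl min h with hM
    set N := t.foldl max h with hN
    have hMin : M ∈ idxs := hsub _ (pv_foldl_min_mem t h)
    have hNin : N ∈ idxs := hsub _ (pv_foldl_max_mem t h)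
    have hM12 : M < 12 := hlt M hMin
    have hN12 : N < 12 := hlt N hNin
    have hhead : ((List.range 12).filter p).head? = some M := by
      apply pv_head_filter p _ (List.pairwise_lt_range) M
        (List.mem_range.mpr hM12) ((hmemidx M hM12).mp hMin)
      intro k hk hpk
      exact pv_foldl_min_le t h k ((hcase ▸ (hmemidx k (List.mem_range.mp hk)).mpr hpk))
    have hlast : ((List.range 12).filter p).getLast? = some N := by
      apply pv_getLast_filter p _ (List.pairwise_lt_range) N
        (List.mem_range.mpr hN12) ((hmemidx N hN12).mp hNin)
      intro k hk hpk
      exact pv_le_foldl_max t h k ((hcase ▸ (hmemidx k (List.mem_range.mp hk)).mpr hpk))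
    rw [pv_match_eq]
    rw [List.head?_map, List.getLast?_map, hhead, hlast]
    rfl

-- ===== VERDICT (by name: the statement is the Claim_ definition above) =====
theorem extract_min_max_sizes_spec : Claim_equal_extract_min_max_sizes := by
  intro sizes _
  unfold Spec_extract_min_max_sizes extract_min_max_sizes extract_min_max_sizes_alt
  rw [show pvStepA = (fun acc x => if pvOrder.contains x then pvInner acc x else acc) from rfl,
      PySem.List.foldl_if_eq_foldl_filter (fun t => pvOrder.contains t) pvInner]
  rw [pv_main _ (fun t ht => by simpa using (List.mem_filter.mp ht).2)]
  exact pv_bridge _
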